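-- pv_equiv track=rewrite | github.com/Ziczin/SQG_ATT | src/replace_string.py | replacing
-- ===== SOURCE A (Python) =====
-- from typing import Union
--
-- def replacing(string: str, config: Union[list, tuple]) -> tuple:
--     "Prepare config string"
--     pairs = {}
--     for pair in config:
--         p = pair.strip()
--         pairs[p[0]] = p[-1]
--
--     "Character replacement and counting substitutions"
--     new_str = ""
--     count = 0
--     for ch in string:
--         if ch in pairs:
--             count += 1
--             new_str += pairs[ch]
--         else:
--             new_str += ch
--     return new_str, count
-- ===== SOURCE B (Python) =====
-- def replacing(string, config):
--     pairs = {}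
--     for pair in config:
--         p = pair.strip()
--         pairs[p[0]] = p[-1]
--     new_str = string.translate(str.maketrans(pairs))
--     count = sum(string.count(k) for k in pairs)
--     return new_str, count
-- ===== Notes on version B (the rewrite author's own statement) =====
-- stated objective: alternative
-- what changed: A's single loop that appends to the result string and counts hits in one pass is split into a translation-table pass (str.translate(str.maketrans(pairs))) plus a separate per-key counting pass (sum(string.count(k) for k in pairs)).
import Mathlib
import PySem

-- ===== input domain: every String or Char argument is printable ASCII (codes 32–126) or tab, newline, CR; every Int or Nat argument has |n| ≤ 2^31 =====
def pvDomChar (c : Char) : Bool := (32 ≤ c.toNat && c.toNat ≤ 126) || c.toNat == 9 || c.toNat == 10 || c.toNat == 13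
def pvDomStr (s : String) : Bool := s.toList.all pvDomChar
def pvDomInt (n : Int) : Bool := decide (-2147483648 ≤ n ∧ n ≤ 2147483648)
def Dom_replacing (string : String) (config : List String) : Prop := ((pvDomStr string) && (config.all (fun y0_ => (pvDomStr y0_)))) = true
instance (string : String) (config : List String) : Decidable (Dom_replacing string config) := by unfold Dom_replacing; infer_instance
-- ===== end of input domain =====

-- B replaces A's single replace-and-count loop by a translation-table map plus per-key count scans
-- (objective: alternative decomposition, same cost).

-- ===== PORT A =====
def replacing (string : String) (config : List String) : String × Int :=
  let pairs : PySem.Dict Char Char := config.foldl (fun d pair =>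
    let p := (PySem.Str.strip pair).toList
    d.insert (PySem.List.pyGetD p 0 ' ') (PySem.List.pyGetD p (-1) ' ')) PySem.Dict.empty
  let r := string.toList.foldl (fun (acc : List Char × Int) ch =>
    if pairs.contains ch then (acc.1 ++ [pairs.getD ch ch], acc.2 + 1)
    else (acc.1 ++ [ch], acc.2)) ([], 0)
  (String.ofList r.1, r.2)

-- ===== PORT B =====
def replacing_alt (string : String) (config : List String) : String × Int :=
  let pairs : PySem.Dict Char Char := config.foldl (fun d pair =>
    let p := (PySem.Str.strip pair).toList
    d.insert (PySem.List.pyGetD p 0 ' ') (PySem.List.pyGetD p (-1) ' ')) PySem.Dict.empty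
  -- string.translate(str.maketrans(pairs)): each code point is looked up in the table, unmapped ones pass through
  let newStr := String.ofList (string.toList.map (fun ch => pairs.getD ch ch))
  -- sum(string.count(k) for k in pairs)
  let count := pairs.keys.foldl (fun acc k => acc + (PySem.Str.count string (String.ofList [k]) : Int)) 0
  (newStr, count)

-- ===== PRECONDITION & SPEC =====
-- Pre_ excludes configs containing an entry that strips to the empty string: there A raises IndexError
-- on p[0] (and B raises the same way).
def Pre_replacing (string : String) (config : List String) : Prop :=
  ∀ pair ∈ config, (PySem.Str.strip pair).toList ≠ []
instance (string : String) (config : List String) : Decidable (Pre_replacing string config) := by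
  unfold Pre_replacing; infer_instance
def pvWitness_replacing : String × List String := ("abcab", ["ab", " c d "])

def Spec_replacing (string : String) (config : List String) (out : String × Int) : Prop := out = replacing_alt string config
instance (string : String) (config : List String) (out : String × Int) : Decidable (Spec_replacing string config out) := by unfold Spec_replacing; infer_instance

-- ===== CLAIM (what is proved, stated in full; the proofs are below) =====
def Claim_equal_replacing : Prop := ∀ (string : String) (config : List String), Dom_replacing string config → Pre_replacing string config → Spec_replacing string config (replacing string config)

-- ===== LEMMAS AND PROOFS =====

-- counting a single character with Python's str.count is List.count
theorem count_go_singleton (c : Char) :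
    ∀ (l : List Char) (fuel acc : Nat), l.length ≤ fuel →
      PySem.Chars.count.go [c] fuel l acc = acc + l.count c := by
  intro l
  induction l with
  | nil => intro fuel acc _; cases fuel <;> simp [PySem.Chars.count.go.eq_def]
  | cons a t ih =>
    intro fuel acc h
    cases fuel with
    | zero => simp at h
    | succ fuel =>
      rw [PySem.Chars.count.go.eq_def]
      by_cases hc : a = c
      · subst hc
        simp only [List.isPrefixOf_cons₂, List.isPrefixOf_nil_left, beq_self_eq_true,
          Bool.and_self, if_true, List.length_cons, List.drop_succ_cons, List.length_nil,
          List.drop_zero]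
        rw [ih fuel (acc + 1) (by simpa using h)]
        simp
        omega
      · have hpre : ([c].isPrefixOf (a :: t)) = false := by
          simp [List.isPrefixOf_cons₂]; exact fun h' => (hc h'.symm).elim
        simp only [hpre, Bool.false_eq_true, if_false]
        rw [ih fuel acc (by simpa using h)]
        simp [hc]

theorem count_singleton (s : List Char) (c : Char) :
    PySem.Chars.count s [c] = s.count c := by
  rw [PySem.Chars.count]
  simp only [List.isEmpty_cons, Bool.false_eq_true, if_false]
  rw [count_go_singleton c s s.length 0 le_rfl]
  simp

-- Σ_{k ∈ ks} s.count k = number of characters of s lying in ks, for nodup ks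
theorem sum_count_eq_countP (s : List Char) :
    ∀ (ks : List Char), ks.Nodup →
      (ks.map (fun k => s.count k)).sum = s.countP (fun ch => decide (ch ∈ ks)) := by
  induction s with
  | nil => intro ks _; simp
  | cons a t ih =>
    intro ks hk
    have h1 : (ks.map (fun k => (a :: t).count k)).sum
        = (ks.map (fun k => t.count k)).sum + (ks.map (fun k => if a = k then 1 else 0)).sum := by
      rw [← List.sum_map_add]
      exact congrArg List.sum (List.map_congr_left (fun k _ => by simp [List.count_cons]))
    have h2 : (ks.map (fun k => if a = k then 1 else 0)).sum = if a ∈ ks then 1 else 0 := by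
      clear ih h1
      induction ks with
      | nil => simp
      | cons b bs ihk =>
        simp only [List.nodup_cons] at hk
        rcases hk with ⟨hb, hbs⟩
        by_cases hba : b = a
        · subst hba
          have hz : (bs.map (fun k => if b = k then 1 else 0)).sum = 0 := by
            apply List.sum_eq_zero; intro x hx
            simp only [List.mem_map] at hx
            obtain ⟨k, hkmem, hke⟩ := hx
            rw [← hke, if_neg]
            intro hkb; exact hb (hkb ▸ hkmem)
          simp [hz]
        · have hab : ¬ a = b := fun h => hba h.symm
          simp [ihk hbs, List.mem_cons, hab]
    rw [h1, h2, ih ks hk]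
    by_cases ha : a ∈ ks <;> simp [ha]

-- keys of the pairs dict are nodup
theorem nodup_keys_pairs (config : List String) :
    (config.foldl (fun d pair =>
      let p := (PySem.Str.strip pair).toList
      d.insert (PySem.List.pyGetD p 0 ' ') (PySem.List.pyGetD p (-1) ' '))
      (PySem.Dict.empty : PySem.Dict Char Char)).keys.Nodup := by
  have : ∀ (cfg : List String) (d : PySem.Dict Char Char), d.keys.Nodup →
      (cfg.foldl (fun d pair =>
        let p := (PySem.Str.strip pair).toList
        d.insert (PySem.List.pyGetD p 0 ' ') (PySem.List.pyGetD p (-1) ' ')) d).keys.Nodup := by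
    intro cfg
    induction cfg with
    | nil => intro d hd; simpa using hd
    | cons c cs ih =>
      intro d hd
      exact ih _ (PySem.Dict.nodup_keys_insert d _ _ hd)
  exact this config PySem.Dict.empty PySem.Dict.nodup_keys_empty

-- A's combined loop produces the mapped string and the countP of table hits
theorem loopA (d : PySem.Dict Char Char) :
    ∀ (s : List Char) (pre : List Char) (n : Int),
      s.foldl (fun (acc : List Char × Int) ch =>
        if d.contains ch then (acc.1 ++ [d.getD ch ch], acc.2 + 1)
        else (acc.1 ++ [ch], acc.2)) (pre, n)
      = (pre ++ s.map (fun ch => d.getD ch ch),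
         n + (s.countP (fun ch => d.contains ch) : Int)) := by
  intro s
  induction s with
  | nil => intro pre n; simp
  | cons a t ih =>
    intro pre n
    simp only [List.foldl_cons]
    by_cases h : d.contains a
    · simp only [h, if_true, ih, List.map_cons, List.countP_cons]
      apply Prod.ext
      · simp
      · push_cast; ring
    · have hgd : d.getD a a = a := PySem.Dict.getD_of_not_contains d a (by simpa using h)
      simp only [h, Bool.false_eq_true, if_false, ih, List.map_cons, List.countP_cons, hgd]
      simp

-- ===== VERDICT (by name: the statement is the Claim_ definition above) =====
theorem replacing_spec : Claim_equal_replacing := by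
  intro string config _ _
  unfold Spec_replacing replacing replacing_alt
  set d := config.foldl (fun d pair =>
    let p := (PySem.Str.strip pair).toList
    d.insert (PySem.List.pyGetD p 0 ' ') (PySem.List.pyGetD p (-1) ' '))
    (PySem.Dict.empty : PySem.Dict Char Char) with hd
  simp only [loopA d string.toList [] 0, List.nil_append, Int.zero_add]
  refine Prod.ext rfl ?_
  simp only [PySem.List.foldl_add (d.keys)
    (fun k => (PySem.Str.count string (String.ofList [k]) : Int)) 0]
  have hnodup : d.keys.Nodup := by rw [hd]; exact nodup_keys_pairs config
  have hpred : (fun ch => d.contains ch) = (fun ch => decide (ch ∈ d.keys)) := by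
    funext ch; exact PySem.Dict.contains_eq_decide_mem_keys d ch
  rw [hpred, ← sum_count_eq_countP string.toList d.keys hnodup]
  have hmap : d.keys.map (fun k => (PySem.Str.count string (String.ofList [k]) : Int))
      = d.keys.map (fun k => ((string.toList.count k : Nat) : Int)) :=
    List.map_congr_left (fun k _ => by simp [count_singleton])
  rw [hmap]
  simp [Nat.cast_list_sum, List.map_map, Function.comp_def]
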